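-- pv_equiv track=rewrite | github.com/prestonbrown/coding-agent-lessons | core/lessons_manager.py | detect_phase_from_tools
-- ===== SOURCE A (Python) =====
-- def detect_phase_from_tools(tools: list) -> str:
--     """
--     Detect the approach phase based on tool usage patterns.
--
--     Tool usage patterns:
--     - research: Read, Grep, Glob (mostly reading/searching)
--     - planning: Write to .md files, AskUserQuestion, EnterPlanMode
--     - implementing: Edit, Write to code files
--     - review: Bash with test/build commands
--
--     Priority (highest to lowest): review > implementing > planning > research
--
--     Args:
--         tools: List of tool usage dicts with 'name' and optional parameters
--
--     Returns:
--         Phase string: 'research', 'planning', 'implementing', or 'review'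
--     """
--     if not tools:
--         return "research"
--
--     # Track signals for each phase
--     has_review = False
--     has_implementing = False
--     has_planning = False
--
--     # Test/build command patterns
--     test_patterns = ["pytest", "test", "npm run test", "npm test", "jest", "mocha"]
--     build_patterns = ["npm run build", "make", "cargo build", "go build", "tsc"]
--
--     for tool in tools:
--         name = tool.get("name", "")
--
--         # Review phase: test or build commands
--         if name == "Bash":
--             command = tool.get("command", "").lower()
--             for pattern in test_patterns + build_patterns:
--                 if pattern in command:
--                     has_review = True
--                     break
--
--         # Implementing phase: Edit or Write to code files
--         elif name == "Edit":
--             has_implementing = True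
--
--         elif name == "Write":
--             file_path = tool.get("file_path", "")
--             # Writing to .md files is planning, not implementing
--             if file_path.endswith(".md"):
--                 has_planning = True
--             else:
--                 has_implementing = True
--
--         # Planning phase: AskUserQuestion or plan-related tools
--         elif name == "AskUserQuestion":
--             has_planning = True
--
--         # EnterPlanMode indicates start of planning (research phase initially)
--         elif name == "EnterPlanMode":
--             # EnterPlanMode starts with research to understand the codebase
--             # Don't set any flags - let it default to research
--             pass
--
--     # Apply priority: review > implementing > planning > research
--     if has_review:
--         return "review"
--     if has_implementing:
--         return "implementing"
--     if has_planning: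
--         return "planning"
--
--     return "research"
-- ===== SOURCE B (Python) =====
-- _PATTERNS = ["pytest", "test", "npm run test", "npm test", "jest", "mocha",
--              "npm run build", "make", "cargo build", "go build", "tsc"]
--
--
-- def _is_review(tool):
--     return tool.get("name", "") == "Bash" and any(
--         p in tool.get("command", "").lower() for p in _PATTERNS)
--
--
-- def _is_implementing(tool):
--     name = tool.get("name", "")
--     return name == "Edit" or (
--         name == "Write" and not tool.get("file_path", "").endswith(".md"))
--
--
-- def _is_planning(tool):
--     name = tool.get("name", "")
--     return name == "AskUserQuestion" or (
--         name == "Write" and tool.get("file_path", "").endswith(".md"))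
--
--
-- def detect_phase_from_tools(tools: list) -> str:
--     # Staged scans in priority order: the first phase whose predicate holds
--     # for some tool wins; no per-tool state is accumulated.
--     for phase, pred in (("review", _is_review),
--                         ("implementing", _is_implementing),
--                         ("planning", _is_planning)):
--         if any(pred(tool) for tool in tools):
--             return phase
--     return "research"
-- ===== Notes on version B (the rewrite author's own statement) =====
-- stated objective: simpler
-- what changed: Replaces A's single pass accumulating three boolean flags followed by a priority if-ladder with three independent phase predicates and staged any-scans in priority order, returning at the first phase that matches (empty input falls through to 'research').
import Mathlib
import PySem

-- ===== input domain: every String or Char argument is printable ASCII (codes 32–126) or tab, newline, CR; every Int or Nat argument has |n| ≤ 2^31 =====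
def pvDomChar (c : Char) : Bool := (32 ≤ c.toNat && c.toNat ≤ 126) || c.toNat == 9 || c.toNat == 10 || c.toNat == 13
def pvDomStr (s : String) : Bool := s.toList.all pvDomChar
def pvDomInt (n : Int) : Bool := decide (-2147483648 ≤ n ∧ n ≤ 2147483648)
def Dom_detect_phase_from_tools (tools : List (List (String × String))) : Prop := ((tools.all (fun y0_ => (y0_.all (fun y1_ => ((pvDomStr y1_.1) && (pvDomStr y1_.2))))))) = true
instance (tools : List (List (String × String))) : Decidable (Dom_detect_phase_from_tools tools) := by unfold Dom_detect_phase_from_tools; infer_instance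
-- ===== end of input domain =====

-- B replaces A's one-pass three-flag accumulation and priority if-ladder by three
-- independent phase predicates and staged any-scans in priority order (objective: simpler).

-- dict.get(k, dflt) on an association list: first match.
def pvGetD (d : List (String × String)) (k dflt : String) : String :=
  match d.find? (fun p => p.1 == k) with
  | some p => p.2
  | none => dflt

-- ===== PORT A =====
def pvStepA (s : Bool × Bool × Bool) (tool : List (String × String)) : Bool × Bool × Bool :=
  let name := pvGetD tool "name" ""
  if name = "Bash" then
    let command := PySem.Str.lower (pvGetD tool "command" "")
    if (["pytest", "test", "npm run test", "npm test", "jest", "mocha"] ++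
        ["npm run build", "make", "cargo build", "go build", "tsc"]).any
          (fun p => PySem.Str.isIn p command) then
      (true, s.2.1, s.2.2)
    else s
  else if name = "Edit" then (s.1, true, s.2.2)
  else if name = "Write" then
    let file_path := pvGetD tool "file_path" ""
    if PySem.Str.endswith file_path ".md" then (s.1, s.2.1, true)
    else (s.1, true, s.2.2)
  else if name = "AskUserQuestion" then (s.1, s.2.1, true)
  else s

def detect_phase_from_tools (tools : List (List (String × String))) : String :=
  if tools = [] then "research"
  else
    let st := tools.foldl pvStepA (false, false, false)
    if st.1 then "review"
    else if st.2.1 then "implementing"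
    else if st.2.2 then "planning"
    else "research"

-- ===== PORT B =====
def pvIsReview (tool : List (String × String)) : Bool :=
  pvGetD tool "name" "" = "Bash" &&
    (["pytest", "test", "npm run test", "npm test", "jest", "mocha",
      "npm run build", "make", "cargo build", "go build", "tsc"]).any
        (fun p => PySem.Str.isIn p (PySem.Str.lower (pvGetD tool "command" "")))

def pvIsImplementing (tool : List (String × String)) : Bool :=
  let name := pvGetD tool "name" ""
  name = "Edit" ||
    (name = "Write" && !(PySem.Str.endswith (pvGetD tool "file_path" "") ".md"))

def pvIsPlanning (tool : List (String × String)) : Bool :=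
  let name := pvGetD tool "name" ""
  name = "AskUserQuestion" ||
    (name = "Write" && PySem.Str.endswith (pvGetD tool "file_path" "") ".md")

-- the staged loop over (phase, predicate) candidates; first match wins
def pvFirstPhase (tools : List (List (String × String)))
    (cands : List (String × (List (String × String) → Bool))) : String :=
  match cands with
  | [] => "research"
  | (phase, pred) :: rest =>
    if tools.any pred then phase else pvFirstPhase tools rest

def detect_phase_from_tools_alt (tools : List (List (String × String))) : String :=
  pvFirstPhase tools
    [("review", pvIsReview), ("implementing", pvIsImplementing), ("planning", pvIsPlanning)]

-- ===== PRECONDITION & SPEC =====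
def Spec_detect_phase_from_tools (tools : List (List (String × String))) (out : String) : Prop := out = detect_phase_from_tools_alt tools
instance (tools : List (List (String × String))) (out : String) : Decidable (Spec_detect_phase_from_tools tools out) := by unfold Spec_detect_phase_from_tools; infer_instance

-- ===== CLAIM =====
def Claim_equal_detect_phase_from_tools : Prop := ∀ (tools : List (List (String × String))), Dom_detect_phase_from_tools tools → Spec_detect_phase_from_tools tools (detect_phase_from_tools tools)

-- ===== LEMMAS AND PROOFS =====

/-- One A-step ORs exactly B's three predicates into the three flags. -/
theorem pvStepA_eq (s : Bool × Bool × Bool) (tool : List (String × String)) :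
    pvStepA s tool =
      (s.1 || pvIsReview tool, s.2.1 || pvIsImplementing tool, s.2.2 || pvIsPlanning tool) := by
  obtain ⟨a, b, c⟩ := s
  simp only [pvStepA, pvIsReview, pvIsImplementing, pvIsPlanning]
  split_ifs with h1 h2 h3 h4 h5 <;> simp_all

/-- A's folded flags are B's three any-scans. -/
theorem pvFoldA_eq (tools : List (List (String × String))) (s : Bool × Bool × Bool) :
    tools.foldl pvStepA s =
      (s.1 || tools.any pvIsReview, s.2.1 || tools.any pvIsImplementing,
       s.2.2 || tools.any pvIsPlanning) := by
  induction tools generalizing s with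
  | nil => simp
  | cons t ts ih =>
    rw [List.foldl_cons, pvStepA_eq, ih]
    simp [Bool.or_assoc]

-- ===== VERDICT =====
theorem detect_phase_from_tools_spec : Claim_equal_detect_phase_from_tools := by
  intro tools _
  unfold Spec_detect_phase_from_tools detect_phase_from_tools detect_phase_from_tools_alt pvFirstPhase
  cases tools with
  | nil => rfl
  | cons t ts =>
    rw [if_neg (List.cons_ne_nil t ts), pvFoldA_eq]
    simp only [Bool.false_or]
    cases h1 : (t :: ts).any pvIsReview <;>
      cases h2 : (t :: ts).any pvIsImplementing <;>
      cases h3 : (t :: ts).any pvIsPlanning <;>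
      simp [pvFirstPhase, h2, h3]
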